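-- pv_equiv track=rewrite | github.com/deus-mouse/Knowledge_Base | 2_Алгоритмы/yandex/course/4/4.3_ладьи_на_шахмат_доске.py | countbeatingrooks
-- ===== SOURCE A (Python) =====
-- def countbeatingrooks(rookcoords):
--     def addrook(roworcol, key):
--         if key not in roworcol:
--             roworcol[key] = 0
--         roworcol[key] += 1
--
--     def countpairs(roworcol):
--         pairs = 0
--         for key in roworcol:
--             pairs += roworcol[key] - 1
--         return pairs
--
--     rooksinrow = {}
--     rooksincol = {}
--     for row, col in rookcoords:
--         addrook(rooksinrow, row)
--         addrook(rooksincol, col)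
--     return countpairs(rooksinrow) + countpairs(rooksincol)
-- ===== SOURCE B (Python) =====
-- def countbeatingrooks(rookcoords):
--     n = 0
--     rows = set()
--     cols = set()
--     for row, col in rookcoords:
--         n += 1
--         rows.add(row)
--         cols.add(col)
--     return 2 * n - len(rows) - len(cols)
-- ===== Notes on version B (the rewrite author's own statement) =====
-- stated objective: simpler
-- what changed: Replaces the two frequency dictionaries and the per-key (count-1) summation loop with a single pass that counts coordinates and collects row/col sets, returning the closed form 2*n - len(rows) - len(cols).
import Mathlib
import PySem

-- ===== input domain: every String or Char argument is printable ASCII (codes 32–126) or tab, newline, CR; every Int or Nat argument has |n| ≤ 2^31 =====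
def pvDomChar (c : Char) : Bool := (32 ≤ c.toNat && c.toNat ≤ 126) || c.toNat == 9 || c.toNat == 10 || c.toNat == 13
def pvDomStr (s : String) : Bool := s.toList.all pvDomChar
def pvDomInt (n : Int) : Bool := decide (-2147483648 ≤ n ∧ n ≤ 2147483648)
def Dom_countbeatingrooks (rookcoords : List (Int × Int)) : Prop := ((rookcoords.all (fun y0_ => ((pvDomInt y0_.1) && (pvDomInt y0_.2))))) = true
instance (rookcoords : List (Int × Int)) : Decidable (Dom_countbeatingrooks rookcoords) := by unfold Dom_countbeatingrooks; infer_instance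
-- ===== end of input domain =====

-- B replaces A's two frequency dictionaries and key-summation loops by a single pass
-- collecting row/col sets and a count n, returning 2*n - |rows| - |cols| (objective: simpler).


-- ===== PORT A =====
-- addrook: if key not in roworcol: roworcol[key] = 0;  roworcol[key] += 1
def pvAddrook (roworcol : PySem.Dict Int Int) (key : Int) : PySem.Dict Int Int :=
  let d := if roworcol.contains key then roworcol else roworcol.insert key 0
  d.insert key (d.getD key 0 + 1)

-- countpairs: pairs = 0; for key in roworcol: pairs += roworcol[key] - 1
def pvCountpairs (roworcol : PySem.Dict Int Int) : Int :=
  roworcol.keys.foldl (fun pairs key => pairs + (roworcol.getD key 0 - 1)) 0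

def countbeatingrooks (rookcoords : List (Int × Int)) : Int :=
  let dicts := rookcoords.foldl
    (fun (st : PySem.Dict Int Int × PySem.Dict Int Int) rc =>
      (pvAddrook st.1 rc.1, pvAddrook st.2 rc.2))
    (PySem.Dict.empty, PySem.Dict.empty)
  pvCountpairs dicts.1 + pvCountpairs dicts.2

-- ===== PORT B =====
def countbeatingrooks_alt (rookcoords : List (Int × Int)) : Int :=
  let st := rookcoords.foldl
    (fun (st : Int × PySem.Set Int × PySem.Set Int) rc =>
      (st.1 + 1, PySem.Set.add st.2.1 rc.1, PySem.Set.add st.2.2 rc.2))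
    (0, PySem.Set.empty, PySem.Set.empty)
  2 * st.1 - (PySem.Set.len st.2.1 : Int) - (PySem.Set.len st.2.2 : Int)

-- ===== PRECONDITION & SPEC =====
def Spec_countbeatingrooks (rookcoords : List (Int × Int)) (out : Int) : Prop := out = countbeatingrooks_alt rookcoords
instance (rookcoords : List (Int × Int)) (out : Int) : Decidable (Spec_countbeatingrooks rookcoords out) := by unfold Spec_countbeatingrooks; infer_instance

-- ===== CLAIM (what is proved, stated in full; the proofs are below) =====
def Claim_equal_countbeatingrooks : Prop := ∀ (rookcoords : List (Int × Int)), Dom_countbeatingrooks rookcoords → Spec_countbeatingrooks rookcoords (countbeatingrooks rookcoords)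

-- ===== LEMMAS AND PROOFS =====

-- addrook is exactly one counter-increment insert
theorem pvAddrook_eq (d : PySem.Dict Int Int) (k : Int) :
    pvAddrook d k = d.insert k (d.getD k 0 + 1) := by
  unfold pvAddrook
  by_cases h : d.contains k = true
  · simp [h]
  · simp only [Bool.not_eq_true] at h
    rw [PySem.Dict.getD_of_not_contains d 0 h]
    simp [h, PySem.Dict.insert_insert_self, PySem.Dict.getD_insert_self]

-- A's pair-of-dicts fold splits into two counter folds over the projections
theorem pvFoldA (l : List (Int × Int)) (d1 d2 : PySem.Dict Int Int) :
    l.foldl (fun (st : PySem.Dict Int Int × PySem.Dict Int Int) rc =>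
        (pvAddrook st.1 rc.1, pvAddrook st.2 rc.2)) (d1, d2)
      = ((l.map (·.1)).foldl pvAddrook d1, (l.map (·.2)).foldl pvAddrook d2) := by
  induction l generalizing d1 d2 with
  | nil => rfl
  | cons x xs ih => simp [List.foldl_cons, ih]

theorem pvFoldA_counter (xs : List Int) :
    xs.foldl pvAddrook PySem.Dict.empty = PySem.Dict.counter xs := by
  have h : xs.foldl pvAddrook PySem.Dict.empty
      = xs.foldl (fun d x => d.insert x (d.getD x 0 + 1)) PySem.Dict.empty := by
    apply PySem.List.foldl_congr_mem
    intro d x _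
    exact pvAddrook_eq d x
  rw [h, PySem.Dict.foldl_insert_getD_add_one_eq_counter]

-- sum of (v - 1) over an Int-valued map as a sum minus a length
theorem pvFoldSub (s : List Int) (f : Int → Int) (acc : Int) :
    s.foldl (fun p k => p + (f k - 1)) acc
      = acc + (s.map f).sum - (s.length : Int) := by
  induction s generalizing acc with
  | nil => simp
  | cons x xs ih => simp [List.foldl_cons, ih]; ring

-- countpairs on a counter is length minus number of distinct elements
theorem pvCountpairs_counter (xs : List Int) :
    pvCountpairs (PySem.Dict.counter xs)
      = (xs.length : Int) - ((PySem.Set.ofList xs).length : Int) := by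
  unfold pvCountpairs
  rw [PySem.Dict.keys_counter]
  have hc : ∀ k, (PySem.Dict.counter xs).getD k 0 = (xs.count k : Int) := fun k =>
    PySem.Dict.getD_counter xs k
  have h1 : (PySem.Set.ofList xs).foldl
      (fun p k => p + ((PySem.Dict.counter xs).getD k 0 - 1)) 0
      = (PySem.Set.ofList xs).foldl (fun p k => p + ((xs.count k : Int) - 1)) 0 := by
    apply PySem.List.foldl_congr_mem
    intro p k _; rw [hc]
  rw [h1, pvFoldSub]
  have hperm : (PySem.Set.ofList xs).Perm xs.dedup := by
    apply (List.perm_ext_iff_of_nodup (PySem.Set.nodup_ofList xs) xs.nodup_dedup).2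
    intro a
    rw [PySem.Set.mem_ofList, List.mem_dedup]
  have hsum : ((PySem.Set.ofList xs).map (fun k => (xs.count k : Int))).sum
      = ((xs.dedup.map fun k => (xs.count k : Int))).sum :=
    (hperm.map _).sum_eq
  have hlen : ((xs.dedup.map fun k => (xs.count k : Int))).sum = (xs.length : Int) := by
    rw [show (fun k => ((xs.count k : Nat) : Int)) = (Nat.cast ∘ fun k => xs.count k) from rfl,
      ← List.map_map, ← Nat.cast_list_sum, List.sum_map_count_dedup_eq_length]
  rw [hsum, hlen]
  ring

-- B's triple fold: projections
theorem pvFoldB (l : List (Int × Int)) (n : Int) (s1 s2 : PySem.Set Int) :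
    l.foldl (fun (st : Int × PySem.Set Int × PySem.Set Int) rc =>
        (st.1 + 1, PySem.Set.add st.2.1 rc.1, PySem.Set.add st.2.2 rc.2)) (n, s1, s2)
      = (n + (l.length : Int),
         PySem.Set.update s1 (l.map (·.1)),
         PySem.Set.update s2 (l.map (·.2))) := by
  induction l generalizing n s1 s2 with
  | nil => simp [PySem.Set.update_nil]
  | cons x xs ih =>
      simp only [List.foldl_cons, ih, List.map_cons, List.length_cons,
        PySem.Set.update_cons]
      refine congrArg (fun m => (m, _, _)) ?_
      push_cast; ring

-- ===== VERDICT (by name: the statement is the Claim_ definition above) =====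
theorem countbeatingrooks_spec : Claim_equal_countbeatingrooks := by
  intro l _
  show countbeatingrooks l = countbeatingrooks_alt l
  unfold countbeatingrooks countbeatingrooks_alt
  rw [pvFoldA, pvFoldA_counter, pvFoldA_counter, pvFoldB]
  simp only [pvCountpairs_counter, PySem.Set.len, PySem.Set.update_empty,
    List.length_map]
  ring
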